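-- pv_equiv track=rewrite | github.com/kimhhyeonjin/Algorithm | 프로그래머스/1/161989. 덧칠하기/덧칠하기.py | solution
-- ===== SOURCE A (Python) =====
-- def solution(n, m, section):
--     answer = 0
--
--     i = 1
--     s = 0
--     flag = True
--     while flag:
--         if i < section[s]:
--             i = section[s]
--         i += (m - 1)
--         answer += 1
--         for se in range(s, len(section)):
--             if section[se] > i:
--                 s = se
--                 break
--             if se == len(section) - 1:
--                 flag = False
--     return answer
-- ===== SOURCE B (Python) =====
-- def solution(n, m, section):
--     # One flat greedy pass. A stroke of the roller covers m consecutive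
--     # sections starting no earlier than section 1 (the wall is sections 1..n),
--     # and the first stroke is always needed; after that, each section beyond
--     # the painted boundary costs one more stroke.
--     answer = 1
--     painted = max(section[0], 1) + m - 1
--     for x in section[1:]:
--         if x > painted:
--             answer += 1
--             painted = x + m - 1
--     return answer
-- ===== Notes on version B (the rewrite author's own statement) =====
-- stated objective: simpler
-- what changed: Replaces A's outer while-loop with a running index plus an inner forward scan for the next uncovered section by one flat greedy pass over the sections that maintains the rightmost painted position (fewer passes over skipped elements and no per-step rescans, a constant-factor gain).
import Mathlib
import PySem

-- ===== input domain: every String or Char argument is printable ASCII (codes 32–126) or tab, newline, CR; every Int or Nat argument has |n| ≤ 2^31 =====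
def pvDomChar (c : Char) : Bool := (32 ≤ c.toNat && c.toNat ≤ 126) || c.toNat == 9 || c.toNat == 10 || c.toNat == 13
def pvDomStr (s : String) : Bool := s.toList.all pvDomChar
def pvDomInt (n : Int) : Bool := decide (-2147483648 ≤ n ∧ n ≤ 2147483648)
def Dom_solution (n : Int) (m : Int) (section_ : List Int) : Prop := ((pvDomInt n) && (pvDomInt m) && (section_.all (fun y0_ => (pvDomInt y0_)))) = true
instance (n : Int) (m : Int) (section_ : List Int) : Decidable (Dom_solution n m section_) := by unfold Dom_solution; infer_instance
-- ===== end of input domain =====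

-- B replaces A's while-loop + inner forward scan by one flat greedy pass keeping the rightmost painted position (objective: simpler).


-- ===== PORT A =====
-- inner 'for se in range(s, len(section))': first index se ≥ s with section[se] > i;
-- 'some se' is the break that sets s, 'none' is the exhausted loop that sets flag = False
def scanA (section_ : List Int) (i : Int) (s : Nat) : Option Nat :=
  if h : s < section_.length then
    if section_[s] > i then some s else scanA section_ i (s + 1)
  else none
termination_by section_.length - s

-- the 'while flag' loop, state (s, i, answer); fuel = length suffices because s strictly
-- increases.  The fuel-out and index-out branches return 'answer' exactly where the Python
-- loops forever (m ≤ 0) or raises IndexError (section = []), both excluded by Pre_solution.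
def loopA (section_ : List Int) (m : Int) : Nat → Nat → Int → Int → Int
  | 0, _, _, answer => answer
  | fuel + 1, s, i, answer =>
    match section_[s]? with
    | none => answer
    | some x =>
      let i2 := (if i < x then x else i) + (m - 1)
      match scanA section_ i2 s with
      | some s' => loopA section_ m fuel s' i2 (answer + 1)
      | none => answer + 1

def solution (n : Int) (m : Int) (section_ : List Int) : Int :=
  loopA section_ m section_.length 0 1 0

-- ===== PORT B =====
-- Source B's loop body: one stroke more when x lies beyond the painted boundary
def paintStep (m : Int) (p : Int × Int) (x : Int) : Int × Int :=
  if x > p.2 then (p.1 + 1, x + m - 1) else p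

def solution_alt (n : Int) (m : Int) (section_ : List Int) : Int :=
  match section_ with
  | [] => 0    -- unreachable under Pre_solution: Source B's section[0] raises IndexError on []
  | x0 :: rest => (rest.foldl (paintStep m) (1, max x0 1 + m - 1)).1

-- ===== PRECONDITION & SPEC =====
-- Pre_ excludes exactly the inputs on which A does not return: section = [] (IndexError on
-- section[0]) and m ≤ 0 with a nonempty section (the while-loop never terminates).
def Pre_solution (n : Int) (m : Int) (section_ : List Int) : Prop := 1 ≤ m ∧ section_ ≠ []
instance (n : Int) (m : Int) (section_ : List Int) : Decidable (Pre_solution n m section_) := by unfold Pre_solution; infer_instance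
def pvWitness_solution : Int × Int × List Int := (8, 4, [1, 5, 8])
def Spec_solution (n : Int) (m : Int) (section_ : List Int) (out : Int) : Prop := out = solution_alt n m section_
instance (n : Int) (m : Int) (section_ : List Int) (out : Int) : Decidable (Spec_solution n m section_ out) := by unfold Spec_solution; infer_instance

-- ===== CLAIM (what is proved, stated in full; the proofs are below) =====
def Claim_equal_solution : Prop := ∀ (n : Int) (m : Int) (section_ : List Int), Dom_solution n m section_ → Pre_solution n m section_ → Spec_solution n m section_ (solution n m section_)

-- ===== LEMMAS AND PROOFS =====

-- a scan starting at an already-covered index steps past it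
theorem scanA_skip (section_ : List Int) (i : Int) (s : Nat) (hs : s < section_.length)
    (hle : section_[s] ≤ i) : scanA section_ i s = scanA section_ i (s + 1) := by
  rw [scanA, dif_pos hs, if_neg (not_lt.2 hle)]

-- what a successful scan guarantees about the index it returns
theorem scanA_some (section_ : List Int) (i : Int) (t s' : Nat)
    (h : scanA section_ i t = some s') :
    t ≤ s' ∧ ∃ hs : s' < section_.length, i < section_[s'] := by
  fun_induction scanA section_ i t with
  | case1 t ht hgt =>
    simp only [Option.some.injEq] at h
    subst h; exact ⟨le_refl _, ht, hgt⟩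
  | case2 t ht hgt ih =>
    obtain ⟨h1, h2⟩ := ih h
    exact ⟨Nat.le_of_succ_le h1, h2⟩
  | case3 t ht => simp at h

-- the fold skips exactly the elements the scan skips
theorem fold_skip (section_ : List Int) (m i : Int) (t : Nat) (ans : Int) :
    List.foldl (paintStep m) (ans, i) (section_.drop t)
      = (match scanA section_ i t with
         | some s' => List.foldl (paintStep m) (ans, i) (section_.drop s')
         | none => (ans, i)) := by
  fun_induction scanA section_ i t with
  | case1 t ht hgt => simp
  | case2 t ht hgt ih =>
    rw [List.drop_eq_getElem_cons ht, List.foldl_cons]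
    have hstep : paintStep m (ans, i) section_[t] = (ans, i) := by
      unfold paintStep; exact if_neg (by simpa using hgt)
    rw [hstep]; exact ih
  | case3 t ht =>
    rw [List.drop_eq_nil_of_le (by omega)]
    simp [List.foldl_nil]

theorem fold_skip_some (section_ : List Int) (m i : Int) (t s' : Nat) (ans : Int)
    (h : scanA section_ i t = some s') :
    List.foldl (paintStep m) (ans, i) (section_.drop t)
      = List.foldl (paintStep m) (ans, i) (section_.drop s') := by
  rw [fold_skip, h]

-- main loop invariant: from a synchronised state (answer, boundary) the two programs agree
theorem loop_eq_fold (section_ : List Int) (m : Int) (hm : 1 ≤ m) :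
    ∀ fuel t : Nat, ∀ i ans : Int, section_.length ≤ fuel + t →
      (match scanA section_ i t with
       | some s' => loopA section_ m fuel s' i ans
       | none => ans)
        = (List.foldl (paintStep m) (ans, i) (section_.drop t)).1 := by
  intro fuel
  induction fuel with
  | zero =>
    intro t i ans hlen
    have hscan : scanA section_ i t = none := by
      rw [scanA, dif_neg (by omega)]
    rw [fold_skip, hscan]
  | succ fu ih =>
    intro t i ans hlen
    cases hscan : scanA section_ i t with
    | none => rw [fold_skip, hscan]
    | some s' =>
      obtain ⟨hts, hs, hgt⟩ := scanA_some section_ i t s' hscan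
      have hv : section_[s']? = some section_[s'] := List.getElem?_eq_getElem hs
      show loopA section_ m (fu + 1) s' i ans
          = (List.foldl (paintStep m) (ans, i) (section_.drop t)).1
      rw [loopA, hv]
      simp only
      rw [if_pos hgt]
      have hskip : scanA section_ (section_[s'] + (m - 1)) s'
          = scanA section_ (section_[s'] + (m - 1)) (s' + 1) :=
        scanA_skip section_ _ s' hs (by omega)
      rw [hskip, ih (s' + 1) (section_[s'] + (m - 1)) (ans + 1) (by omega)]
      rw [fold_skip_some section_ m i t s' ans hscan,
        List.drop_eq_getElem_cons hs, List.foldl_cons]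
      have hstep : paintStep m (ans, i) section_[s']
          = (ans + 1, section_[s'] + (m - 1)) := by
        unfold paintStep; rw [if_pos (by simpa using hgt)]
        congr 1; omega
      rw [hstep]

-- ===== VERDICT (by name: the statement is the Claim_ definition above) =====
theorem solution_spec : Claim_equal_solution := by
  intro n m section_ _hdom hpre
  obtain ⟨hm, hne⟩ := hpre
  unfold Spec_solution
  cases section_ with
  | nil => exact absurd rfl hne
  | cons x0 rest =>
    show loopA (x0 :: rest) m (x0 :: rest).length 0 1 0
        = (rest.foldl (paintStep m) (1, max x0 1 + m - 1)).1
    have hlen : (x0 :: rest).length = rest.length + 1 := rfl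
    rw [hlen, loopA]
    have h0 : (x0 :: rest)[0]? = some x0 := rfl
    rw [h0]
    simp only
    have hmax : (if (1 : Int) < x0 then x0 else 1) = max x0 1 := by
      simp only [max_def]; split_ifs <;> omega
    rw [hmax]
    have hx0 : x0 ≤ max x0 1 + (m - 1) := by
      have := le_max_left x0 1; omega
    have hskip : scanA (x0 :: rest) (max x0 1 + (m - 1)) 0
        = scanA (x0 :: rest) (max x0 1 + (m - 1)) 1 :=
      scanA_skip (x0 :: rest) _ 0 (by simp) (by simpa using hx0)
    rw [hskip,
      loop_eq_fold (x0 :: rest) m hm rest.length 1 (max x0 1 + (m - 1)) (0 + 1) (by simp)]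
    have : max x0 1 + (m - 1) = max x0 1 + m - 1 := by omega
    rw [this]
    norm_num
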